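-- pv_equiv track=rewrite | github.com/pypi-data/pypi-mirror-95 | packages/vectorbt/vectorbt-0.16.6.tar.gz/vectorbt-0.16.6/vectorbt/utils/config.py | copy_dict
-- ===== SOURCE A (Python) =====
-- from copy import copy
--
-- def copy_dict(dct):
--     """Copy dict using shallow-deep copy hybrid.
--
--     Traverses all nested dicts and copies each value using shallow copy."""
--     dct_copy = dict()
--     for k, v in dct.items():
--         if isinstance(v, dict):
--             dct_copy[k] = copy_dict(v)
--         else:
--             dct_copy[k] = copy(v)
--     return dct_copy
-- ===== SOURCE B (Python) =====
-- from copy import copy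
--
-- def copy_dict(dct):
--     """Copy dict using shallow-deep copy hybrid (iterative worklist version)."""
--     dct_copy = dict()
--     worklist = [(dct, dct_copy)]
--     while worklist:
--         src, dst = worklist.pop(0)
--         for k, v in src.items():
--             if isinstance(v, dict):
--                 child = dict()
--                 dst[k] = child
--                 worklist.append((v, child))
--             else:
--                 dst[k] = copy(v)
--     return dct_copy
-- ===== Notes on version B (the rewrite author's own statement) =====
-- stated objective: alternative
-- what changed: Replaces A's recursive descent into nested dicts by an iterative breadth-first worklist of (source, destination) dict pairs: the result skeleton is created as traversal proceeds and child dicts are filled when their worklist entry is popped.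
import Mathlib
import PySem

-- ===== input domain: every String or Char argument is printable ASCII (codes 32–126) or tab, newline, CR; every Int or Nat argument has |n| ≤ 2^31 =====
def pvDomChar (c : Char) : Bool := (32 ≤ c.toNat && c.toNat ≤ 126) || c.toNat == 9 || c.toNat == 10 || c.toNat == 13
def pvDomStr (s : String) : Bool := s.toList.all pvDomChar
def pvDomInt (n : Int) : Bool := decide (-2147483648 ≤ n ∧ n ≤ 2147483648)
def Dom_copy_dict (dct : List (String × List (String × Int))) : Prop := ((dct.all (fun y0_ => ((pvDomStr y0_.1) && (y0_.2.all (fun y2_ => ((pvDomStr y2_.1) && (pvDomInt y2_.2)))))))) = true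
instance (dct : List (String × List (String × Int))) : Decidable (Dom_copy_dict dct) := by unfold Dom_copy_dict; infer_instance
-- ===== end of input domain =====

-- B replaces A's recursion by an iterative breadth-first worklist of (source, destination) dict pairs
-- (objective: alternative — same cost, different traversal strategy).

-- ===== PORT A =====
-- recursive call copy_dict(v): v's values are ints (never dicts at this type), so every
-- iteration takes the else-branch 'dct_copy[k] = copy(v)'; copy() of an int is the int itself
def copyInnerA (v : List (String × Int)) : List (String × Int) :=
  (v.foldl (fun d p => d.insert p.1 p.2) (PySem.Dict.empty : PySem.Dict String Int)).items

def copy_dict (dct : List (String × List (String × Int))) : List (String × List (String × Int)) :=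
  (dct.foldl (fun d kv => d.insert kv.1 (copyInnerA kv.2))
    (PySem.Dict.empty : PySem.Dict String (List (String × Int)))).items

-- ===== PORT B =====
-- At this type the worklist only ever holds children of the root, so a destination dict is
-- identified exactly by its key in the root result dict: a worklist entry (src, child-dict)
-- of Source B is modelled as (src, key). 'dst[k] = copy(v)' mutates the child in place, modelled
-- by re-inserting the updated child at its key.
-- first worklist iteration: pops (dct, root); every v is a dict, so it creates an empty child
-- at k in the root and appends (v, k) to the worklist
def bRoot (dct : List (String × List (String × Int))) :
    PySem.Dict String (PySem.Dict String Int) × List (List (String × Int) × String) :=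
  dct.foldl (fun st kv => (st.1.insert kv.1 PySem.Dict.empty, st.2 ++ [(kv.2, kv.1)]))
    ((PySem.Dict.empty : PySem.Dict String (PySem.Dict String Int)), [])

-- remaining worklist iterations: each popped (src, key) has only int values, so the loop body
-- is 'dst[k] = copy(v)' on the child at key
def bFill : List (List (String × Int) × String) → PySem.Dict String (PySem.Dict String Int) →
    PySem.Dict String (PySem.Dict String Int)
  | [], r => r
  | (src, key) :: rest, r =>
      bFill rest
        (src.foldl (fun r' p => r'.insert key ((r'.getD key PySem.Dict.empty).insert p.1 p.2)) r)

def copy_dict_alt (dct : List (String × List (String × Int))) : List (String × List (String × Int)) :=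
  (bFill (bRoot dct).2 (bRoot dct).1).items.map (fun kv => (kv.1, kv.2.items))

-- ===== PRECONDITION & SPEC =====
-- Pre_ excludes association lists with duplicate top-level keys: they do not represent any
-- Python dict (Python collapses duplicates before copy_dict ever runs), so neither port's
-- behaviour there corresponds to either Python program.
def Pre_copy_dict (dct : List (String × List (String × Int))) : Prop :=
  (dct.map (fun kv => kv.1)).Nodup

instance (dct : List (String × List (String × Int))) : Decidable (Pre_copy_dict dct) := by
  unfold Pre_copy_dict; infer_instance

def pvWitness_copy_dict : (List (String × List (String × Int))) :=
  [("a", [("x", 1), ("y", 2)]), ("b", [])]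

def Spec_copy_dict (dct : List (String × List (String × Int))) (out : List (String × List (String × Int))) : Prop := out = copy_dict_alt dct
instance (dct : List (String × List (String × Int))) (out : List (String × List (String × Int))) : Decidable (Spec_copy_dict dct out) := by unfold Spec_copy_dict; infer_instance

-- ===== CLAIM (what is proved, stated in full; the proofs are below) =====
def Claim_equal_copy_dict : Prop := ∀ (dct : List (String × List (String × Int))), Dom_copy_dict dct → Pre_copy_dict dct → Spec_copy_dict dct (copy_dict dct)

-- ===== LEMMAS AND PROOFS =====

-- re-inserting the value a key already holds leaves the dict unchanged
theorem insert_getD_refl {κ ν : Type} [BEq κ] [LawfulBEq κ] (r : PySem.Dict κ ν) (k : κ) (d0 : ν)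
    (hn : r.keys.Nodup) (hc : r.contains k = true) : r.insert k (r.getD k d0) = r := by
  apply PySem.Dict.ext
  rw [PySem.Dict.items_insert_of_contains r _ hc]
  conv_rhs => rw [← List.map_id r.items]
  apply List.map_congr_left
  intro p hp
  by_cases h : p.1 = k
  · have hm : (k, p.2) ∈ r.items := by rw [← h]; exact hp
    have hgd := PySem.Dict.getD_of_mem_items r hm hn d0
    simp [h, hgd]
    exact h ▸ Prod.mk.eta
  · simp [h]

-- two inserts at the same key collapse to the last one
theorem insert_insert_self {κ ν : Type} [BEq κ] [LawfulBEq κ] (r : PySem.Dict κ ν) (k : κ) (a b : ν) :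
    (r.insert k a).insert k b = r.insert k b := by
  apply PySem.Dict.ext
  rw [PySem.Dict.items_insert_of_contains _ _ (PySem.Dict.contains_insert_self r k a)]
  by_cases hc : r.contains k = true
  · rw [PySem.Dict.items_insert_of_contains r a hc, PySem.Dict.items_insert_of_contains r b hc,
      List.map_map]
    apply List.map_congr_left
    intro p _
    by_cases h : p.1 = k <;> simp [h]
  · rw [PySem.Dict.items_insert_of_not_contains r a (by simpa using hc),
      PySem.Dict.items_insert_of_not_contains r b (by simpa using hc), List.map_append]
    have h1 : List.map (fun p => if (p.1 == k) = true then (k, b) else p) r.items = r.items := by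
      conv_rhs => rw [← List.map_id r.items]
      apply List.map_congr_left
      intro p hp
      have hmem : p.1 ∈ r.keys := by
        simp only [PySem.Dict.keys]
        exact List.mem_map_of_mem hp
      have hne : p.1 ≠ k := by
        intro he
        exact absurd ((PySem.Dict.contains_iff_mem_keys r k).2 (he ▸ hmem)) (by simpa using hc)
      simp [hne]
    rw [h1]
    simp

-- the per-element inner loop of bFill, hoisted: it rebuilds the child once
theorem bFill_inner_hoist (src : List (String × Int)) (r : PySem.Dict String (PySem.Dict String Int))
    (key : String) (hn : r.keys.Nodup) (hc : r.contains key = true) :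
    src.foldl (fun r' p => r'.insert key ((r'.getD key PySem.Dict.empty).insert p.1 p.2)) r
      = r.insert key (src.foldl (fun d p => d.insert p.1 p.2) (r.getD key PySem.Dict.empty)) := by
  induction src generalizing r with
  | nil => exact (insert_getD_refl r key PySem.Dict.empty hn hc).symm
  | cons p ps ih =>
      simp only [List.foldl_cons]
      rw [ih (r.insert key ((r.getD key PySem.Dict.empty).insert p.1 p.2))
        (PySem.Dict.nodup_keys_insert r key _ hn) (PySem.Dict.contains_insert_self r key _),
        PySem.Dict.getD_insert_self, insert_insert_self]

-- a key occurring in a Nodup-keyed association list is found as its own pair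
theorem find?_key_self (dct : List (String × List (String × Int)))
    (hn : (dct.map (fun kv => kv.1)).Nodup) (kv : String × List (String × Int)) (h : kv ∈ dct) :
    dct.find? (fun y => y.1 == kv.1) = some kv := by
  induction dct with
  | nil => simp at h
  | cons x xs ih =>
      simp only [List.map_cons, List.nodup_cons] at hn
      rcases List.mem_cons.mp h with h | h
      · subst h; simp
      · have hne : x.1 ≠ kv.1 := by
          intro he; exact hn.1 (he ▸ List.mem_map_of_mem h)
        rw [List.find?_cons_of_neg (by simpa using hne)]
        exact ih hn.2 h

-- the fill phase updates exactly the keys on the worklist, in place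
theorem bFill_items (l : List (String × List (String × Int)))
    (r : PySem.Dict String (PySem.Dict String Int))
    (hn : r.keys.Nodup) (hl : (l.map (fun kv => kv.1)).Nodup)
    (hin : ∀ kv ∈ l, r.get? kv.1 = some PySem.Dict.empty) :
    (bFill (l.map (fun kv => (kv.2, kv.1))) r).items
      = r.items.map (fun p =>
          match l.find? (fun kv => kv.1 == p.1) with
          | some kv => (p.1, kv.2.foldl (fun d q => d.insert q.1 q.2) PySem.Dict.empty)
          | none => p) := by
  induction l generalizing r with
  | nil => simp [bFill]
  | cons kv rest ih =>
      simp only [List.map_cons, List.nodup_cons] at hl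
      have hget : r.get? kv.1 = some PySem.Dict.empty := hin kv (List.mem_cons_self)
      have hc : r.contains kv.1 = true := by
        rw [PySem.Dict.contains_eq_isSome_get?, hget]; rfl
      simp only [List.map_cons, bFill]
      rw [bFill_inner_hoist _ _ _ hn hc, PySem.Dict.getD_of_get?_eq_some r PySem.Dict.empty hget]
      set inner := kv.2.foldl (fun d q => d.insert q.1 q.2) (PySem.Dict.empty : PySem.Dict String Int) with hinner
      have hstep := ih (r.insert kv.1 inner) (PySem.Dict.nodup_keys_insert r kv.1 inner hn) hl.2 ?_
      · rw [hstep, PySem.Dict.items_insert_of_contains r inner hc, List.map_map]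
        apply List.map_congr_left
        intro p _
        by_cases h : p.1 = kv.1
        · have hnone : rest.find? (fun y => y.1 == kv.1) = none := by
            apply List.find?_eq_none.2
            intro y hy hbeq
            exact hl.1 ((eq_of_beq hbeq) ▸ List.mem_map_of_mem hy)
          simp [h, hnone, hinner]
        · have : (kv.1 == p.1) = false := by simp [Ne.symm h]
          simp [h, this]
      · intro y hy
        rw [PySem.Dict.get?_insert_of_ne r inner ?_]
        · exact hin y (List.mem_cons_of_mem kv hy)
        · intro he
          exact hl.1 (he ▸ List.mem_map_of_mem hy)

-- the root phase: its dict holds an empty child per key of dct, its worklist is dct's pairs flipped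
theorem bRoot_eq (dct : List (String × List (String × Int))) :
    bRoot dct = (dct.foldl (fun d kv => d.insert kv.1 PySem.Dict.empty) PySem.Dict.empty,
      dct.map (fun kv => (kv.2, kv.1))) := by
  unfold bRoot
  rw [PySem.List.foldl_prod_mk (fun d kv => d.insert kv.1 PySem.Dict.empty)
    (fun acc kv => acc ++ [(kv.2, kv.1)]) dct PySem.Dict.empty []]
  rw [PySem.List.foldl_append_singleton_eq_map]
  simp

theorem bRoot_fst (dct : List (String × List (String × Int))) :
    (bRoot dct).1 = dct.foldl (fun d kv => d.insert kv.1 PySem.Dict.empty) PySem.Dict.empty := by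
  rw [bRoot_eq]

theorem bRoot_snd (dct : List (String × List (String × Int))) :
    (bRoot dct).2 = dct.map (fun kv => (kv.2, kv.1)) := by
  rw [bRoot_eq]

-- ===== VERDICT (by name: the statement is the Claim_ definition above) =====
theorem copy_dict_spec : Claim_equal_copy_dict := by
  intro dct _ hpre
  unfold Spec_copy_dict copy_dict copy_dict_alt
  have hfresh : ∀ kv ∈ dct, (PySem.Dict.empty : PySem.Dict String (List (String × Int))).contains kv.1 = false := by
    intro kv _; exact PySem.Dict.contains_empty kv.1
  have hfresh' : ∀ kv ∈ dct, (PySem.Dict.empty : PySem.Dict String (PySem.Dict String Int)).contains kv.1 = false := by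
    intro kv _; exact PySem.Dict.contains_empty kv.1
  rw [PySem.Dict.items_foldl_insert_fresh dct (fun kv => kv.1) (fun kv => copyInnerA kv.2) _ hfresh hpre]
  rw [bRoot_fst, bRoot_snd]
  set r0 := dct.foldl (fun d kv => d.insert kv.1 PySem.Dict.empty)
    (PySem.Dict.empty : PySem.Dict String (PySem.Dict String Int)) with hr0
  have hitems : r0.items = dct.map (fun kv => (kv.1, (PySem.Dict.empty : PySem.Dict String Int))) := by
    rw [hr0, PySem.Dict.items_foldl_insert_fresh dct (fun kv => kv.1)
      (fun _ => (PySem.Dict.empty : PySem.Dict String Int)) _ hfresh' hpre]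
    rfl
  have hkeys : r0.keys.Nodup := by
    simp only [PySem.Dict.keys, hitems, List.map_map]
    exact hpre
  have hget : ∀ kv ∈ dct, r0.get? kv.1 = some PySem.Dict.empty := by
    intro kv hkv
    exact PySem.Dict.get?_of_mem_items r0
      (by rw [hitems]; exact List.mem_map_of_mem hkv) hkeys
  rw [bFill_items dct r0 hkeys hpre hget, hitems, List.map_map, List.map_map]
  have hemp : (PySem.Dict.empty : PySem.Dict String (List (String × Int))).items = [] := rfl
  rw [hemp, List.nil_append]
  apply List.map_congr_left
  intro kv hkv
  have hfind := find?_key_self dct hpre kv hkv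
  simp [Function.comp, hfind, copyInnerA]
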